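-- pv_equiv track=rewrite | github.com/nahkim/Algorithm | 2309.py | find_seven_nanjang
-- ===== SOURCE A (Python) =====
-- def find_seven_nanjang(nanjang_list):
--     total = 0
--     for i in range(len(nanjang_list) - 1):
--         for j in range(i + 1, len(nanjang_list)):
--             for k in range(len(nanjang_list)):
--                 if k != i and k != j:
--                     total += nanjang_list[k]
--             if total == 100:
--                 res_list = [i, j]
--                 return res_list
--             total = 0
-- ===== SOURCE B (Python) =====
-- def find_seven_nanjang(nanjang_list):
--     # target so that excluding a[i] and a[j] leaves 100: a[i] + a[j] == sum - 100
--     target = sum(nanjang_list) - 100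
--     rest = nanjang_list
--     i = 0
--     while rest:
--         x, rest = rest[0], rest[1:]
--         for off, y in enumerate(rest):
--             if x + y == target:
--                 return [i, i + 1 + off]
--         i += 1
-- ===== Notes on version B (the rewrite author's own statement) =====
-- stated objective: faster
-- what changed: B precomputes the total sum once and walks the list structurally (peeling a head element and scanning its tail for a partner with x+y == total-100), removing A's inner k-scan that re-sums the list for every pair.
import Mathlib
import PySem

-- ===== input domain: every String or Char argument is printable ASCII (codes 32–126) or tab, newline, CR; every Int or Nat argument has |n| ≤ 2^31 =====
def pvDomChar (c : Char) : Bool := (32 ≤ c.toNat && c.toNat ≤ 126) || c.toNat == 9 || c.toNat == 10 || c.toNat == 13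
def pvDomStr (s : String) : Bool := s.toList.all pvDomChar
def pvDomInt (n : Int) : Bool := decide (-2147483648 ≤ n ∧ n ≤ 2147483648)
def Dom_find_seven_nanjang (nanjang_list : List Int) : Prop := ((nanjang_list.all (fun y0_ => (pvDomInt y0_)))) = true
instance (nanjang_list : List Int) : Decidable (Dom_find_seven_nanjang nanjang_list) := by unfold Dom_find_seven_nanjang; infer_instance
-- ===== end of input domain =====

-- B precomputes the total sum once and recurses structurally on the list, scanning each
-- tail for a partner y with x + y = total - 100: O(n^2) instead of A's O(n^3) inner re-sum.

-- ===== PORT A =====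
-- inner k-loop of A: for k in range(len): if k != i and k != j: total += a[k]
def fsnK (xs : List Int) (i j : Nat) : Int :=
  (List.range xs.length).foldl (fun t k => if k ≠ i ∧ k ≠ j then t + xs.getD k 0 else t) 0

-- inner j-loop of A (the early return becomes `some`, loop exhaustion `none`)
def fsnJ (xs : List Int) (i j : Nat) : Option (List Int) :=
  if j < xs.length then
    if fsnK xs i j = 100 then some [(i : Int), (j : Int)]
    else fsnJ xs i (j + 1)
  else none
termination_by xs.length - j

-- outer i-loop of A
def fsnI (xs : List Int) (i : Nat) : Option (List Int) :=
  if i < xs.length - 1 then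
    match fsnJ xs i (i + 1) with
    | some r => some r
    | none => fsnI xs (i + 1)
  else none
termination_by xs.length - 1 - i

def find_seven_nanjang (nanjang_list : List Int) : Option (List Int) :=
  fsnI nanjang_list 0

-- ===== PORT B =====
-- B's inner scan: for off, y in enumerate(rest): if x + y == target: return [i, j]
-- (j carries i + 1 + off directly)
def fsnBScan (target x : Int) (i j : Nat) : List Int → Option (List Int)
  | [] => none
  | y :: ys => if x + y = target then some [(i : Int), (j : Int)] else fsnBScan target x i (j + 1) ys

-- B's while loop: peel the head x, scan the tail, advance i
def fsnBPeel (target : Int) (i : Nat) : List Int → Option (List Int)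
  | [] => none
  | x :: rest =>
    match fsnBScan target x i (i + 1) rest with
    | some r => some r
    | none => fsnBPeel target (i + 1) rest

def find_seven_nanjang_alt (nanjang_list : List Int) : Option (List Int) :=
  fsnBPeel (nanjang_list.sum - 100) 0 nanjang_list

-- ===== PRECONDITION & SPEC =====
def Spec_find_seven_nanjang (nanjang_list : List Int) (out : Option (List Int)) : Prop := out = find_seven_nanjang_alt nanjang_list
instance (nanjang_list : List Int) (out : Option (List Int)) : Decidable (Spec_find_seven_nanjang nanjang_list out) := by unfold Spec_find_seven_nanjang; infer_instance

-- ===== CLAIM =====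
def Claim_equal_find_seven_nanjang : Prop := ∀ (nanjang_list : List Int), Dom_find_seven_nanjang nanjang_list → Spec_find_seven_nanjang nanjang_list (find_seven_nanjang nanjang_list)

-- ===== LEMMAS AND PROOFS =====

-- the A-side foldl with an additive step equals the start plus a mapped sum
theorem fsn_foldl_if_add (xs : List Int) (i j : Nat) (l : List Nat) (t : Int) :
    l.foldl (fun t k => if k ≠ i ∧ k ≠ j then t + xs.getD k 0 else t) t
      = t + (l.map (fun k => if k ≠ i ∧ k ≠ j then xs.getD k 0 else 0)).sum := by
  induction l generalizing t with
  | nil => simp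
  | cons a l ih =>
    simp only [List.foldl_cons, List.map_cons, List.sum_cons]
    split_ifs with h
    · rw [ih]; ring
    · rw [ih]; ring

theorem fsn_map_range_getD (xs : List Int) :
    (List.range xs.length).map (fun k => xs.getD k 0) = xs := by
  apply List.ext_getElem
  · simp
  · intro k h1 h2
    simp [List.getD_eq_getElem?_getD, List.getElem?_eq_getElem h2]

theorem fsn_sum_single (a : Int) (i n : Nat) (h : i < n) :
    ((List.range n).map (fun k => if k = i then a else 0)).sum = a := by
  induction n with
  | zero => omega
  | succ n ih =>
    rw [List.range_succ]
    rcases Nat.lt_or_ge i n with h' | h'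
    · simp [ih h', if_neg (by omega : ¬ n = i)]
    · have : i = n := by omega
      subst this
      simp
      have : ∀ k ∈ List.range i, (if k = i then a else 0) = 0 := by
        intro k hk; simp at hk; simp [Nat.ne_of_lt hk]
      rw [List.map_congr_left this]; simp

theorem fsnK_eq (xs : List Int) (i j : Nat) (hij : i ≠ j) (hi : i < xs.length) (hj : j < xs.length) :
    fsnK xs i j = xs.sum - xs.getD i 0 - xs.getD j 0 := by
  unfold fsnK
  rw [fsn_foldl_if_add, zero_add]
  have hpt : ∀ k, (if k ≠ i ∧ k ≠ j then xs.getD k 0 else 0)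
      = xs.getD k 0 - (if k = i then xs.getD i 0 else 0) - (if k = j then xs.getD j 0 else 0) := by
    intro k
    by_cases h1 : k = i <;> by_cases h2 : k = j <;> simp_all
  calc ((List.range xs.length).map (fun k => if k ≠ i ∧ k ≠ j then xs.getD k 0 else 0)).sum
      = ((List.range xs.length).map (fun k =>
          xs.getD k 0 - (if k = i then xs.getD i 0 else 0) - (if k = j then xs.getD j 0 else 0))).sum := by
        exact congrArg List.sum (List.map_congr_left (fun k _ => hpt k))
    _ = ((List.range xs.length).map (fun k => xs.getD k 0)).sum
        - ((List.range xs.length).map (fun k => if k = i then xs.getD i 0 else 0)).sum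
        - ((List.range xs.length).map (fun k => if k = j then xs.getD j 0 else 0)).sum := by
        induction (List.range xs.length) with
        | nil => simp
        | cons a l ih => simp only [List.map_cons, List.sum_cons, ih]; ring
    _ = xs.sum - xs.getD i 0 - xs.getD j 0 := by
        rw [fsn_map_range_getD, fsn_sum_single _ _ _ hi, fsn_sum_single _ _ _ hj]

-- getD through drop
theorem fsn_drop_getD (xs : List Int) (j : Nat) (y : Int) (ys : List Int)
    (h : xs.drop j = y :: ys) : xs.getD j 0 = y ∧ j < xs.length := by
  have hj : j < xs.length := by
    by_contra hc
    rw [List.drop_eq_nil_of_le (by omega)] at h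
    simp at h
  have hget : xs[j]? = some y := by
    have h0 : (xs.drop j)[0]? = xs[j + 0]? := List.getElem?_drop
    simp only [Nat.add_zero] at h0
    rw [← h0, h]; simp
  refine ⟨?_, hj⟩
  simp [List.getD_eq_getElem?_getD, hget]

-- A's inner j-loop agrees with B's tail scan
theorem fsnJ_eq_scan (xs : List Int) (i : Nat) (hi : i < xs.length) :
    ∀ (ys : List Int) (j : Nat), i < j → xs.drop j = ys →
      fsnJ xs i j = fsnBScan (xs.sum - 100) (xs.getD i 0) i j ys := by
  intro ys
  induction ys with
  | nil =>
    intro j _ hdrop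
    have hj : xs.length ≤ j := by
      by_contra hc
      have := List.drop_eq_nil_iff.mp hdrop
      omega
    rw [fsnJ, if_neg (by omega)]; rfl
  | cons y ys ih =>
    intro j hij hdrop
    obtain ⟨hy, hj⟩ := fsn_drop_getD xs j y ys hdrop
    have hk := fsnK_eq xs i j (by omega) hi hj
    have hcond : (fsnK xs i j = 100) ↔ (xs.getD i 0 + y = xs.sum - 100) := by
      rw [hk, hy]; constructor <;> intro hx <;> omega
    rw [fsnJ, if_pos hj, fsnBScan]
    by_cases hc : fsnK xs i j = 100
    · rw [if_pos hc, if_pos (hcond.mp hc)]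
    · rw [if_neg hc, if_neg (fun hx => hc (hcond.mpr hx))]
      have hdrop' : xs.drop (j + 1) = ys := by
        have hdd : List.drop 1 (List.drop j xs) = List.drop (j + 1) xs := List.drop_drop
        rw [← hdd, hdrop]; simp
      exact ih (j + 1) (by omega) hdrop'

-- A's outer i-loop agrees with B's structural peel
theorem fsnI_eq_peel (xs : List Int) :
    ∀ (rest : List Int) (i : Nat), xs.drop i = rest →
      fsnI xs i = fsnBPeel (xs.sum - 100) i rest := by
  intro rest
  induction rest with
  | nil =>
    intro i hdrop
    have : xs.length ≤ i := by
      by_contra hc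
      have := List.drop_eq_nil_iff.mp hdrop
      omega
    rw [fsnI, if_neg (by omega)]; rfl
  | cons x rest ih =>
    intro i hdrop
    obtain ⟨hx, hi⟩ := fsn_drop_getD xs i x rest hdrop
    have hdrop' : xs.drop (i + 1) = rest := by
      have hdd : List.drop 1 (List.drop i xs) = List.drop (i + 1) xs := List.drop_drop
      rw [← hdd, hdrop]; simp
    rw [fsnBPeel]
    by_cases h : i < xs.length - 1
    · rw [fsnI, if_pos h]
      have hs := fsnJ_eq_scan xs i hi rest (i + 1) (by omega) hdrop'
      rw [hx] at hs
      rw [hs]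
      cases fsnBScan (xs.sum - 100) x i (i + 1) rest with
      | some r => rfl
      | none => exact ih (i + 1) hdrop'
    · -- i = length - 1: rest is empty, both sides give none
      have hrest : rest = [] := by
        have hlen := congrArg List.length hdrop
        simp at hlen
        have : rest.length = 0 := by omega
        exact List.eq_nil_of_length_eq_zero this
      subst hrest
      rw [fsnI, if_neg h]
      simp [fsnBScan, fsnBPeel]

-- ===== VERDICT =====
theorem find_seven_nanjang_spec : Claim_equal_find_seven_nanjang := by
  intro xs _
  unfold Spec_find_seven_nanjang find_seven_nanjang find_seven_nanjang_alt
  exact fsnI_eq_peel xs xs 0 (by simp)
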